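-- pv_equiv track=rewrite | github.com/hrana2/Year-I | CS-115/Labs/life.py | innerCells
-- ===== SOURCE A (Python) =====
-- def createOneRow(width):
--     """Returns one row of zeros of width "width"...
--        You should use this in your
--        createBoard(width, height) function."""
--     row = []
--     for col in range(width):
--         row += [0]
--     return row
--
-- def createBoard(width, height):
--     """Returns a 2d array with "height" rows and "width" cols"""
--     A = []
--     for row in range(height):
--         A += [createOneRow(width)]
--     return A
--
-- def innerCells(w, h):
--     A = createBoard(w, h)
--     for row in range(h):
--         for col in range(w):
--             if 0 < row < h - 1 and 0 < col < w - 1: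
--                 A[row][col] = 1
--             else:
--                 A[row][col] = 0
--     return A
-- ===== SOURCE B (Python) =====
-- def innerCells(w, h):
--     # Build the grid row-by-row from three precomputed row shapes instead of
--     # creating an all-zero board and then re-assigning every cell.
--     if h <= 0:
--         return []
--     if h <= 2 or w <= 2:
--         return [[0] * max(w, 0) for _ in range(h)]
--     return ([[0] * w]
--             + [[0] + [1] * (w - 2) + [0] for _ in range(h - 2)]
--             + [[0] * w])
-- ===== Notes on version B (the rewrite author's own statement) =====
-- stated objective: simpler
-- what changed: Instead of creating an all-zero h-by-w board and then rewriting every cell with a nested per-cell conditional loop, B classifies each row once (border row vs interior row) and concatenates precomputed row shapes built by list multiplication, never touching individual cells.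
import Mathlib
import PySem

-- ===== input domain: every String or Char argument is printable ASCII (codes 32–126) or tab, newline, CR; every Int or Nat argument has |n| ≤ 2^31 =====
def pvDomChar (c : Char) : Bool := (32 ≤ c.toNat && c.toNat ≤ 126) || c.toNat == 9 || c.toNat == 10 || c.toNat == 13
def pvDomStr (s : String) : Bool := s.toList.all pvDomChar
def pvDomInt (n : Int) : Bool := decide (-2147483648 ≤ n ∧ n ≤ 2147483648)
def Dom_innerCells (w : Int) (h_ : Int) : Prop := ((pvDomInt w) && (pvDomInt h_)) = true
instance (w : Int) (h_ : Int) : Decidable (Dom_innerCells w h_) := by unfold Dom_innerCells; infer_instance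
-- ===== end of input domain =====

-- B builds the grid from precomputed border/interior row shapes instead of zeroing a board and
-- rewriting every cell; same result, simpler construction.


-- ===== PORT A =====
-- row = []; for col in range(width): row += [0]
def pvCreateOneRow (width : Int) : List Int :=
  (PySem.List.pyRange 0 width 1).foldl (fun row _ => row ++ [0]) []

-- A = []; for row in range(height): A += [createOneRow(width)]
def pvCreateBoard (width height : Int) : List (List Int) :=
  (PySem.List.pyRange 0 height 1).foldl (fun A _ => A ++ [pvCreateOneRow width]) []

-- nested loop assigning A[row][col] = 1 or 0; indices are always in range, so
-- the in-place assignment is List.modify/List.set at the non-negative index.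
def innerCells (w : Int) (h_ : Int) : List (List Int) :=
  (PySem.List.pyRange 0 h_ 1).foldl (fun A row =>
    (PySem.List.pyRange 0 w 1).foldl (fun A col =>
      A.modify row.toNat (fun r =>
        r.set col.toNat (if 0 < row ∧ row < h_ - 1 ∧ 0 < col ∧ col < w - 1 then 1 else 0))) A)
    (pvCreateBoard w h_)

-- ===== PORT B =====
def innerCells_alt (w : Int) (h_ : Int) : List (List Int) :=
  if h_ ≤ 0 then []
  else if h_ ≤ 2 ∨ w ≤ 2 then
    List.replicate h_.toNat (List.replicate (max w 0).toNat 0)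
  else
    [List.replicate w.toNat 0]
      ++ List.replicate (h_ - 2).toNat ([0] ++ List.replicate (w - 2).toNat 1 ++ [0])
      ++ [List.replicate w.toNat 0]

-- ===== PRECONDITION & SPEC =====
def Spec_innerCells (w : Int) (h_ : Int) (out : List (List Int)) : Prop := out = innerCells_alt w h_
instance (w : Int) (h_ : Int) (out : List (List Int)) : Decidable (Spec_innerCells w h_ out) := by unfold Spec_innerCells; infer_instance

-- ===== CLAIM (what is proved, stated in full; the proofs are below) =====
def Claim_equal_innerCells : Prop := ∀ (w : Int) (h_ : Int), Dom_innerCells w h_ → Spec_innerCells w h_ (innerCells w h_)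

-- ===== LEMMAS AND PROOFS =====

-- the cell value A's nested loop assigns at (row i, col j)
def pvVal (w h_ : Int) (i j : Nat) : Int :=
  if 0 < (i : Int) ∧ (i : Int) < h_ - 1 ∧ 0 < (j : Int) ∧ (j : Int) < w - 1 then 1 else 0

def pvRow (w h_ : Int) (i : Nat) : List Int := (List.range w.toNat).map (pvVal w h_ i)

def pvCanon (w h_ : Int) : List (List Int) := (List.range h_.toNat).map (pvRow w h_)

theorem pv_modify_modify (A : List (List Int)) (i : Nat) (f g : List Int → List Int) :
    (A.modify i f).modify i g = A.modify i (fun r => g (f r)) := by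
  induction A generalizing i with
  | nil => simp
  | cons a as ih =>
    cases i with
    | zero => simp
    | succ n => simpa using ih n

theorem pv_modify_id (A : List (List Int)) (i : Nat) : A.modify i (fun r => r) = A := by
  induction A generalizing i with
  | nil => simp
  | cons a as ih =>
    cases i with
    | zero => simp
    | succ n => simpa using ih n

theorem pv_foldl_modify (l : List Nat) (A : List (List Int)) (i : Nat)
    (step : List Int → Nat → List Int) :
    l.foldl (fun A c => A.modify i (fun r => step r c)) A
      = A.modify i (fun r => l.foldl step r) := by
  induction l generalizing A with
  | nil => simp [pv_modify_id]
  | cons c cs ih =>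
    rw [List.foldl_cons, ih, pv_modify_modify]
    rfl

theorem pv_modify_at_boundary (xs : List (List Int)) (x : List Int) (rest : List (List Int))
    (f : List Int → List Int) :
    (xs ++ x :: rest).modify xs.length f = xs ++ f x :: rest := by
  induction xs with
  | nil => simp
  | cons a as ih => simpa using ih

theorem pv_row_set (f : Nat → Int) (k : Nat) :
    ∀ (r : List Int), k ≤ r.length →
      (List.range k).foldl (fun r c => r.set c (f c)) r = (List.range k).map f ++ r.drop k := by
  induction k with
  | zero => intro r _; simp
  | succ k ih =>
    intro r hk
    rw [List.range_succ, List.foldl_append, ih r (by omega), List.foldl_cons, List.foldl_nil,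
      List.set_append]
    have hlen : ((List.range k).map f).length = k := by simp
    rw [if_neg (by omega), hlen, Nat.sub_self,
      List.drop_eq_getElem_cons (show k < r.length by omega), List.set_cons_zero]
    simp

theorem pv_grid (nr : Nat → List Int) (g : Nat → List Int → List Int) (k : Nat) :
    ∀ (A : List (List Int)), k ≤ A.length → (∀ i r, i < k → r ∈ A → g i r = nr i) →
      (List.range k).foldl (fun A i => A.modify i (g i)) A
        = (List.range k).map nr ++ A.drop k := by
  induction k with
  | zero => intro A _ _; simp
  | succ k ih =>
    intro A hk hg
    have hdrop : A.drop k = A[k]'(by omega) :: A.drop (k + 1) :=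
      List.drop_eq_getElem_cons (by omega)
    rw [List.range_succ, List.foldl_append,
      ih A (by omega) (fun i r hi hr => hg i r (by omega) hr),
      List.foldl_cons, List.foldl_nil, hdrop]
    have hlen : ((List.range k).map nr).length = k := by simp
    have hb := pv_modify_at_boundary ((List.range k).map nr) (A[k]'(by omega)) (A.drop (k + 1)) (g k)
    rw [hlen] at hb
    rw [hb, hg k _ (by omega) (List.getElem_mem _)]
    simp

theorem pv_oneRow (width : Int) : pvCreateOneRow width = List.replicate width.toNat 0 := by
  unfold pvCreateOneRow
  rw [show (fun (row : List Int) (_ : Int) => row ++ [(0 : Int)])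
        = fun acc x => acc ++ [(fun (_ : Int) => (0 : Int)) x] from rfl,
    PySem.List.foldl_append_singleton_eq_map, List.map_const']
  simp [PySem.List.length_pyRange_one]

theorem pv_board (width height : Int) :
    pvCreateBoard width height = List.replicate height.toNat (List.replicate width.toNat 0) := by
  unfold pvCreateBoard
  rw [show (fun (A : List (List Int)) (_ : Int) => A ++ [pvCreateOneRow width])
        = fun acc x => acc ++ [(fun (_ : Int) => pvCreateOneRow width) x] from rfl,
    PySem.List.foldl_append_singleton_eq_map, List.map_const', pv_oneRow]
  simp [PySem.List.length_pyRange_one]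

theorem pv_A_canon (w h_ : Int) : innerCells w h_ = pvCanon w h_ := by
  unfold innerCells pvCanon
  rw [pv_board, PySem.List.pyRange_zero h_, PySem.List.pyRange_zero w]
  simp only [List.foldl_map, Int.toNat_natCast]
  have hstep : ∀ (A : List (List Int)) (row : Nat),
      (List.range w.toNat).foldl (fun A (col : Nat) =>
          A.modify row (fun r =>
            r.set col (if 0 < (row : Int) ∧ (row : Int) < h_ - 1 ∧ 0 < (col : Int) ∧
                (col : Int) < w - 1 then 1 else 0))) A
        = A.modify row (fun r =>
            (List.range w.toNat).foldl (fun r col => r.set col (pvVal w h_ row col)) r) := by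
    intro A row
    exact pv_foldl_modify (List.range w.toNat) A row
      (fun r col => r.set col (pvVal w h_ row col))
  simp only [hstep]
  rw [pv_grid (pvRow w h_)
      (fun i r => (List.range w.toNat).foldl (fun r col => r.set col (pvVal w h_ i col)) r)
      h_.toNat _ (by simp) ?_]
  · simp
  · intro i r _ hr
    have hrlen : r.length = w.toNat := by
      rw [List.eq_of_mem_replicate hr]; simp
    dsimp only
    rw [pv_row_set (pvVal w h_ i) w.toNat r (by omega)]
    simp [pvRow, hrlen]

theorem pvVal_zero {w h_ : Int} {i : Nat} (j : Nat)
    (h : ¬(0 < (i : Int) ∧ (i : Int) < h_ - 1) ∨ w ≤ 2) : pvVal w h_ i j = 0 := by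
  unfold pvVal
  rcases h with h | h
  · rw [if_neg]; tauto
  · rw [if_neg]; rintro ⟨-, -, hj1, hj2⟩; omega

theorem pvRow_zero {w h_ : Int} {i : Nat}
    (h : ¬(0 < (i : Int) ∧ (i : Int) < h_ - 1) ∨ w ≤ 2) :
    pvRow w h_ i = List.replicate w.toNat 0 := by
  unfold pvRow
  rw [List.eq_replicate_iff]
  constructor
  · simp
  · intro b hb
    obtain ⟨j, -, rfl⟩ := List.mem_map.1 hb
    exact pvVal_zero j h

theorem pv_range_split (n : Nat) (hn : 2 ≤ n) :
    List.range n = [0] ++ List.range' 1 (n - 2) ++ [n - 1] := by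
  have h1 : n = ((n - 2) + 1) + 1 := by omega
  rw [List.range_eq_range', h1, List.range'_succ, List.range'_concat]
  simp
  omega

theorem pvRow_mid {w h_ : Int} (hw : 3 ≤ w) {i : Nat}
    (hi : 0 < (i : Int) ∧ (i : Int) < h_ - 1) :
    pvRow w h_ i = [0] ++ List.replicate (w - 2).toNat 1 ++ [0] := by
  unfold pvRow
  rw [pv_range_split w.toNat (by omega), List.map_append, List.map_append]
  congr 1
  congr 1
  · simp [pvVal]
  · rw [List.eq_replicate_iff]
    refine ⟨by simp; omega, ?_⟩
    intro b hb
    obtain ⟨j, hj, rfl⟩ := List.mem_map.1 hb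
    obtain ⟨hj1, hj2⟩ := List.mem_range'_1.1 hj
    unfold pvVal
    rw [if_pos ⟨hi.1, hi.2, by omega, by omega⟩]
  · simp only [List.map_cons, List.map_nil]
    congr 1
    unfold pvVal
    rw [if_neg]
    rintro ⟨-, -, -, hlt⟩
    omega

theorem pv_B_canon (w h_ : Int) : innerCells_alt w h_ = pvCanon w h_ := by
  unfold innerCells_alt pvCanon
  split_ifs with h1 h2
  · have : h_.toNat = 0 := by omega
    simp [this]
  · have hmax : (max w 0).toNat = w.toNat := by omega
    rw [hmax]
    refine (List.eq_replicate_iff.2 ⟨by simp, ?_⟩).symm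
    intro b hb
    obtain ⟨i, -, rfl⟩ := List.mem_map.1 hb
    refine pvRow_zero ?_
    rcases h2 with h2 | h2
    · left; rintro ⟨hi1, hi2⟩; omega
    · right; exact h2
  · have hh : 3 ≤ h_ := by omega
    have hw : 3 ≤ w := by omega
    rw [pv_range_split h_.toNat (by omega), List.map_append, List.map_append]
    congr 1
    congr 1
    · simp only [List.map_cons, List.map_nil]
      rw [pvRow_zero (by left; rintro ⟨hi1, -⟩; omega)]
    · refine (List.eq_replicate_iff.2 ⟨by simp; omega, ?_⟩).symm
      intro b hb
      obtain ⟨i, hi, rfl⟩ := List.mem_map.1 hb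
      obtain ⟨hi1, hi2⟩ := List.mem_range'_1.1 hi
      rw [pvRow_mid hw ⟨by omega, by omega⟩]
    · simp only [List.map_cons, List.map_nil]
      rw [pvRow_zero (by left; rintro ⟨-, hi2⟩; omega)]

-- ===== VERDICT (by name: the statement is the Claim_ definition above) =====
theorem innerCells_spec : Claim_equal_innerCells := by
  intro w h_ _
  unfold Spec_innerCells
  rw [pv_A_canon, pv_B_canon]
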